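-- pv_equiv track=rewrite | github.com/Lesiu94/Eldritch | classes/htmlGenerator.py | makeInvestigatorsForChoose
-- ===== SOURCE A (Python) =====
-- def makeInvestigatorsForChoose(invList):
--     htmlString = "<div class=\"row\">"
--     invCount = len(invList)
--
--     for i in range(0, invCount):
--         if i > 0 and i % 3 == 0:
--             htmlString += " </div> " \
--                           " <div class=\"row\"> "
--         htmlString += " <div class=\"col-md-4\"> <p>  <div class=\"form-check\">" \
--                       "<label class=\"form-check-label\">" \
--                       "<input class=\"form-check-input\" type=\"checkbox\" name=\"Investigator\" value=\"\">" \
--                       + invList[i] + "</label> </div> </p> </div>"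
--     htmlString += "</div>"
--     return htmlString
-- ===== SOURCE B (Python) =====
-- CELL_OPEN = (' <div class="col-md-4"> <p>  <div class="form-check">'
--              '<label class="form-check-label">'
--              '<input class="form-check-input" type="checkbox" name="Investigator" value="">')
-- CELL_CLOSE = '</label> </div> </p> </div>'
-- ROW_SEP = ' </div>  <div class="row"> '
--
--
-- def makeInvestigatorsForChoose(invList):
--     rows = [''.join(CELL_OPEN + name + CELL_CLOSE for name in invList[i:i + 3])
--             for i in range(0, len(invList), 3)]
--     return '<div class="row">' + ROW_SEP.join(rows) + '</div>'
-- ===== Notes on version B (the rewrite author's own statement) =====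
-- stated objective: simpler
-- what changed: Replaces the flat index loop with its i % 3 separator test by a chunk comprehension: the list is sliced into rows of three, each row's cells are joined, and the rows are joined with the separator string.
import Mathlib
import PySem

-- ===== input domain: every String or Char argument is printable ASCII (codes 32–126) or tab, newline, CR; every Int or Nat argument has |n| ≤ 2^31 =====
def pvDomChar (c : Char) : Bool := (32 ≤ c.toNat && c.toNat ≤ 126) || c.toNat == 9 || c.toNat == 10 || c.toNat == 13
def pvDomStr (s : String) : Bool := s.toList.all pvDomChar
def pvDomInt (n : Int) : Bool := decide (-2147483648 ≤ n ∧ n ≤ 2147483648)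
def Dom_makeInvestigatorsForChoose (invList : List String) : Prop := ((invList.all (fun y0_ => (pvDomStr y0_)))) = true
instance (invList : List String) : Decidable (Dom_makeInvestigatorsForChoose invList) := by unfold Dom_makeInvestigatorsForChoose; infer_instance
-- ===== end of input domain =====

-- B recursively splits the list into rows of three joined with the separator, instead of A's flat index loop with an i % 3 separator test; same output, simpler decomposition.

-- ===== PORT A =====
-- the markup pieces A appends (string literals split exactly as in the Python source)
def pvCellOpen : String :=
  " <div class=\"col-md-4\"> <p>  <div class=\"form-check\">" ++
  "<label class=\"form-check-label\">" ++
  "<input class=\"form-check-input\" type=\"checkbox\" name=\"Investigator\" value=\"\">"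
def pvCellClose : String := "</label> </div> </p> </div>"
def pvRowSep : String := " </div> " ++ " <div class=\"row\"> "

def makeInvestigatorsForChoose (invList : List String) : String :=
  let invCount : Int := invList.length
  let htmlString :=
    (PySem.List.pyRange 0 invCount 1).foldl
      (fun htmlString i =>
        let htmlString := if i > 0 ∧ PySem.Int.mod i 3 = 0 then htmlString ++ pvRowSep else htmlString
        htmlString ++ pvCellOpen ++ PySem.List.pyGetD invList i "" ++ pvCellClose)
      "<div class=\"row\">"
  htmlString ++ "</div>"

-- ===== PORT B =====
def makeInvestigatorsForChoose_alt (invList : List String) : String :=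
  let rows := (PySem.List.pyRange 0 invList.length 3).map
    (fun i => PySem.Str.join ""
      ((PySem.List.slice invList (some i) (some (i + 3))).map
        (fun name => pvCellOpen ++ name ++ pvCellClose)))
  "<div class=\"row\">" ++ PySem.Str.join pvRowSep rows ++ "</div>"

-- ===== PRECONDITION & SPEC =====
def Spec_makeInvestigatorsForChoose (invList : List String) (out : String) : Prop := out = makeInvestigatorsForChoose_alt invList
instance (invList : List String) (out : String) : Decidable (Spec_makeInvestigatorsForChoose invList out) := by unfold Spec_makeInvestigatorsForChoose; infer_instance

-- ===== CLAIM (what is proved, stated in full; the proofs are below) =====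
def Claim_equal_makeInvestigatorsForChoose : Prop := ∀ (invList : List String), Dom_makeInvestigatorsForChoose invList → Spec_makeInvestigatorsForChoose invList (makeInvestigatorsForChoose invList)

-- ===== LEMMAS AND PROOFS =====

-- proof-side view of B's row list: rows of three, each rendered as its cells' HTML
def pvRows : List String → List String
  | [] => []
  | a :: t =>
    PySem.Str.join "" (((a :: t).take 3).map (fun name => pvCellOpen ++ name ++ pvCellClose)) ::
      pvRows (t.drop 2)
termination_by l => l.length
decreasing_by simp [List.length_drop]

lemma pv_pyRange3_nil (a b : Int) (h : b ≤ a) : PySem.List.pyRange a b 3 = [] := by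
  rw [PySem.List.pyRange_of_pos _ _ (by norm_num), if_neg (by omega)]
  simp

lemma pv_pyRange3_cons (a b : Int) (h : a < b) :
    PySem.List.pyRange a b 3 = a :: PySem.List.pyRange (a + 3) b 3 := by
  rw [PySem.List.pyRange_of_pos _ _ (by norm_num),
      PySem.List.pyRange_of_pos _ _ (by norm_num), if_pos h]
  have hcnt : ((b - a + 3 - 1) / 3).toNat
      = (if a + 3 < b then ((b - (a + 3) + 3 - 1) / 3).toNat else 0) + 1 := by
    split_ifs <;> omega
  rw [hcnt, List.range_succ_eq_map, List.map_cons, List.map_map]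
  congr 1
  · norm_num
  · apply List.map_congr_left
    intro k _
    simp only [Function.comp_apply]
    push_cast
    ring

-- B's comprehension over range(0, len, 3) produces exactly the pvRows of the remaining suffix
lemma pv_rows_eq (l : List String) (t : List String) : ∀ (m : Nat), l.drop m = t →
    (PySem.List.pyRange (m : Int) (l.length : Int) 3).map
      (fun i => PySem.Str.join ""
        ((PySem.List.slice l (some i) (some (i + 3))).map
          (fun name => pvCellOpen ++ name ++ pvCellClose)))
    = pvRows t := by
  induction t using pvRows.induct with
  | case1 =>
    intro m hdrop
    have hlen : l.length ≤ m := List.drop_eq_nil_iff.mp hdrop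
    rw [pv_pyRange3_nil _ _ (by exact_mod_cast hlen)]
    simp [pvRows]
  | case2 a t ih =>
    intro m hdrop
    have hml : m < l.length := by
      by_contra hc
      rw [List.drop_eq_nil_iff.mpr (by omega)] at hdrop
      simp at hdrop
    rw [pv_pyRange3_cons _ _ (by exact_mod_cast hml), List.map_cons]
    have hslice : PySem.List.slice l (some (m : Int)) (some ((m : Int) + 3)) = (a :: t).take 3 := by
      have h := PySem.List.slice_natCast_add (xs := l) (j := m) (n := 3)
      push_cast at h
      rw [h, hdrop]
    have hdrop3 : l.drop (m + 3) = t.drop 2 := by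
      have h3 : l.drop (m + 3) = (l.drop m).drop 3 := by rw [List.drop_drop]
      rw [h3, hdrop]
      rfl
    have hrec := ih (m + 3) hdrop3
    rw [hslice, show ((m : Int) + 3) = ((m + 3 : Nat) : Int) by push_cast; ring, hrec]
    simp [pvRows]

lemma pvJoin_cons_cons (s a b : String) (t : List String) :
    PySem.Str.join s (a :: b :: t) = a ++ s ++ PySem.Str.join s (b :: t) := by
  simp [PySem.Str.join, PySem.Chars.join_cons_cons, String.append_assoc]

lemma pvJoin_singleton (s a : String) : PySem.Str.join s [a] = a := by
  simp [PySem.Str.join]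

lemma pv_get (l t : List String) (m j : Nat) (h : l.drop m = t) :
    PySem.List.pyGetD l ((m : Int) + (j : Int)) "" = t.getD j "" := by
  have hcast : ((m + j : Nat) : Int) = (m : Int) + (j : Int) := by push_cast; ring
  rw [← hcast, PySem.List.pyGetD_natCast]
  have h0 : (List.drop m l)[j]? = l[m + j]? := List.getElem?_drop
  rw [h] at h0
  rw [List.getD_eq_getElem?_getD, List.getD_eq_getElem?_getD, ← h0]

-- the loop of A, started at any index m that is a multiple of 3, produces the B-side rows of the remaining suffix
lemma pv_loop (l : List String) (t : List String) : ∀ (m : Nat) (acc : String),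
    l.drop m = t → m % 3 = 0 →
    (PySem.List.pyRange (m : Int) (l.length : Int) 1).foldl
      (fun htmlString i =>
        let htmlString := if i > 0 ∧ PySem.Int.mod i 3 = 0 then htmlString ++ pvRowSep else htmlString
        htmlString ++ pvCellOpen ++ PySem.List.pyGetD l i "" ++ pvCellClose)
      acc
    = acc ++ (if m ≠ 0 ∧ t ≠ [] then pvRowSep else "") ++ PySem.Str.join pvRowSep (pvRows t) := by
  induction t using pvRows.induct with
  | case1 =>
    intro m acc hdrop _
    have hlen : l.length ≤ m := List.drop_eq_nil_iff.mp hdrop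
    rw [PySem.List.pyRange_one_eq_nil (by exact_mod_cast hlen)]
    simp [pvRows, PySem.Str.join]
  | case2 a t ih =>
    intro m acc hdrop hm
    have hml : m < l.length := by
      by_contra hc
      rw [List.drop_eq_nil_iff.mpr (by omega)] at hdrop
      simp at hdrop
    have hlen : l.length = m + (t.length + 1) := by
      have h := congrArg List.length hdrop
      simp at h
      omega
    have hmodm : PySem.Int.mod (m : Int) 3 = 0 := by
      rw [PySem.Int.mod_eq_emod_of_pos (by norm_num)]; omega
    have hget0 : PySem.List.pyGetD l (m : Int) "" = a := by
      have h := pv_get l (a :: t) m 0 hdrop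
      simpa using h
    have hget1 : PySem.List.pyGetD l ((m : Int) + 1) "" = t.getD 0 "" := by
      have h := pv_get l (a :: t) m 1 hdrop
      simpa using h
    have hget2 : PySem.List.pyGetD l ((m : Int) + 1 + 1) "" = t.getD 1 "" := by
      have h := pv_get l (a :: t) m 2 hdrop
      rw [show ((2 : Nat) : Int) = 1 + 1 by norm_num, ← add_assoc] at h
      simpa using h
    have hmod1 : ¬(((m : Int) + 1) > 0 ∧ PySem.Int.mod ((m : Int) + 1) 3 = 0) := by
      rw [PySem.Int.mod_eq_emod_of_pos (by norm_num)]; omega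
    have hmod2 : ¬(((m : Int) + 1 + 1) > 0 ∧ PySem.Int.mod ((m : Int) + 1 + 1) 3 = 0) := by
      rw [PySem.Int.mod_eq_emod_of_pos (by norm_num)]; omega
    rcases t with _ | ⟨b, t2⟩
    · -- chunk [a]: one loop step, range ends
      simp only [List.length_nil] at hlen
      rw [PySem.List.pyRange_one_cons (by exact_mod_cast hml),
          PySem.List.pyRange_one_eq_nil (by omega)]
      simp only [List.foldl_cons, List.foldl_nil, hget0]
      simp only [pvRows, List.take, List.map, List.drop]
      rw [pvJoin_singleton, pvJoin_singleton]
      rcases eq_or_ne m 0 with h0 | h0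
      · subst h0
        simp [String.append_assoc]
      · have hposn : 0 < m := Nat.pos_of_ne_zero h0
        have hdvd : (3 : Int) ∣ (m : Int) := by omega
        simp [h0, hposn, hdvd, String.append_assoc]
    rcases t2 with _ | ⟨c, rest⟩
    · -- chunk [a, b]: two loop steps, range ends
      simp only [List.length_cons, List.length_nil] at hlen
      rw [PySem.List.pyRange_one_cons (by exact_mod_cast hml),
          PySem.List.pyRange_one_cons (by omega),
          PySem.List.pyRange_one_eq_nil (by omega)]
      simp only [List.foldl_cons, List.foldl_nil, hget0, hget1, if_neg hmod1, List.getD,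
        List.getElem?_cons_zero, Option.getD_some]
      simp only [pvRows, List.take, List.map, List.drop]
      rw [pvJoin_cons_cons, pvJoin_singleton, pvJoin_singleton]
      rcases eq_or_ne m 0 with h0 | h0
      · subst h0
        simp [String.append_assoc]
      · have hposn : 0 < m := Nat.pos_of_ne_zero h0
        have hdvd : (3 : Int) ∣ (m : Int) := by omega
        simp [h0, hposn, hdvd, String.append_assoc]
    · -- chunk [a, b, c]: three loop steps, then the loop from m+3 is the recursive call
      simp only [List.length_cons] at hlen
      have hdrop3 : l.drop (m + 3) = rest := by
        have h3 : l.drop (m + 3) = (l.drop m).drop 3 := by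
          rw [List.drop_drop]
        rw [h3, hdrop]; rfl
      rw [PySem.List.pyRange_one_cons (by exact_mod_cast hml),
          PySem.List.pyRange_one_cons (by omega),
          PySem.List.pyRange_one_cons (by omega)]
      simp only [List.foldl_cons, hget0, hget1, hget2, if_neg hmod1, if_neg hmod2, List.getD,
        List.getElem?_cons_zero, List.getElem?_cons_succ, Option.getD_some]
      rw [show ((m : Int) + 1 + 1 + 1) = ((m + 3 : Nat) : Int) by push_cast; ring]
      rw [ih (m + 3) _ hdrop3 (by omega)]
      simp only [pvRows, List.take, List.map, List.drop]
      rw [pvJoin_cons_cons, pvJoin_cons_cons, pvJoin_singleton]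
      rcases rest with _ | ⟨r, rs⟩
      · simp only [pvRows]
        rw [pvJoin_singleton, show PySem.Str.join pvRowSep ([] : List String) = "" from rfl]
        rcases eq_or_ne m 0 with h0 | h0
        · subst h0
          simp [String.append_assoc]
        · have hposn : 0 < m := Nat.pos_of_ne_zero h0
          have hdvd : (3 : Int) ∣ (m : Int) := by omega
          simp [h0, hposn, hdvd, String.append_assoc]
      · simp only [pvRows]
        rw [pvJoin_cons_cons]
        rcases eq_or_ne m 0 with h0 | h0
        · subst h0
          simp [String.append_assoc]
        · have hposn : 0 < m := Nat.pos_of_ne_zero h0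
          have hdvd : (3 : Int) ∣ (m : Int) := by omega
          simp [h0, hposn, hdvd, String.append_assoc]

-- ===== VERDICT (by name: the statement is the Claim_ definition above) =====
theorem makeInvestigatorsForChoose_spec : Claim_equal_makeInvestigatorsForChoose := by
  intro invList _
  unfold Spec_makeInvestigatorsForChoose makeInvestigatorsForChoose makeInvestigatorsForChoose_alt
  have hrows := pv_rows_eq invList invList 0 rfl
  have h := pv_loop invList invList 0 "<div class=\"row\">" rfl rfl
  simp only [Nat.cast_zero] at h hrows
  simp only [h, hrows]
  simp [String.append_assoc]
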